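-- pv_equiv track=rewrite | github.com/langchain-ai/langchain | libs/community/langchain_community/llms/tongyi.py | generate_with_last_element_mark
-- ===== SOURCE A (Python) =====
-- from typing import (
--     Any,
--     AsyncIterable,
--     AsyncIterator,
--     Callable,
--     Dict,
--     Iterable,
--     Iterator,
--     List,
--     Mapping,
--     Optional,
--     Tuple,
--     TypeVar,
-- )
--
-- T = TypeVar("T")
--
-- def generate_with_last_element_mark(iterable: Iterable[T]) -> Iterator[Tuple[T, bool]]:
--     """Generate elements from an iterable,
--     and a boolean indicating if it is the last element."""
--     iterator = iter(iterable)
--     try: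
--         item = next(iterator)
--     except StopIteration:
--         return
--     for next_item in iterator:
--         yield item, False
--         item = next_item
--     yield item, True
-- ===== SOURCE B (Python) =====
-- def generate_with_last_element_mark(iterable):
--     """Generate elements from an iterable,
--     and a boolean indicating if it is the last element."""
--     items = list(iterable)
--     if not items:
--         return
--     n = len(items)
--     for i, item in enumerate(items):
--         yield item, i == n - 1
-- ===== Notes on version B (the rewrite author's own statement) =====
-- stated objective: simpler
-- what changed: B materializes the iterable into a list and marks lastness by comparing each index against the known length, instead of A's one-step look-ahead that carries a pending previous element.
import Mathlib
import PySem

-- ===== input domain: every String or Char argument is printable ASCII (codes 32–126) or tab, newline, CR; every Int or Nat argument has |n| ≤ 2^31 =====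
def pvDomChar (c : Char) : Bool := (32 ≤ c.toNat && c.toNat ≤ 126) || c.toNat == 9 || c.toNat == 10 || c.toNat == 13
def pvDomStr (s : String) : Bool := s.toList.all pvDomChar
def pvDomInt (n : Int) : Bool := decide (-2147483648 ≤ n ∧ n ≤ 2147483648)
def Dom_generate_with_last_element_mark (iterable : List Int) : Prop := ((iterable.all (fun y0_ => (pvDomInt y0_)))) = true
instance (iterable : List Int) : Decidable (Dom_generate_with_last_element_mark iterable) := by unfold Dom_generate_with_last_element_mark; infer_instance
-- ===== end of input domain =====

-- ===== PORT A =====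
-- B marks lastness by index-vs-length over a materialized list instead of A's one-step look-ahead (objective: simpler).
-- loop body of A: carries the pending `item`, yields (item, false) for each next_item, then (item, true)
def gwlmA_loop (item : Int) : List Int → List (Int × Bool)
  | [] => [(item, true)]
  | next_item :: rest => (item, false) :: gwlmA_loop next_item rest

def generate_with_last_element_mark (iterable : List Int) : List (Int × Bool) :=
  match iterable with
  | [] => []                      -- next(iterator) raises StopIteration: return
  | item :: rest => gwlmA_loop item rest

-- ===== PORT B =====
def generate_with_last_element_mark_alt (iterable : List Int) : List (Int × Bool) :=
  let items := iterable
  match items with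
  | [] => []
  | _ :: _ =>
    (PySem.List.enumerate items).map (fun p => (p.2, decide (p.1 = (items.length : Int) - 1)))

-- ===== PRECONDITION & SPEC =====
def Spec_generate_with_last_element_mark (iterable : List Int) (out : List (Int × Bool)) : Prop := out = generate_with_last_element_mark_alt iterable
instance (iterable : List Int) (out : List (Int × Bool)) : Decidable (Spec_generate_with_last_element_mark iterable out) := by unfold Spec_generate_with_last_element_mark; infer_instance

-- ===== CLAIM (what is proved, stated in full; the proofs are below) =====
def Claim_equal_generate_with_last_element_mark : Prop := ∀ (iterable : List Int), Dom_generate_with_last_element_mark iterable → Spec_generate_with_last_element_mark iterable (generate_with_last_element_mark iterable)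

-- ===== LEMMAS AND PROOFS =====

-- ===== VERDICT (by name: the statement is the Claim_ definition above) =====
lemma gwlmA_loop_enum (rest : List Int) : ∀ (item : Int) (k : Int),
    gwlmA_loop item rest
      = (PySem.List.enumerate (item :: rest) k).map
          (fun p => (p.2, decide (p.1 = k + rest.length))) := by
  induction rest with
  | nil =>
    intro item k
    simp [gwlmA_loop, PySem.List.enumerate_cons, PySem.List.enumerate_nil]
  | cons y ys ih =>
    intro item k
    rw [PySem.List.enumerate_cons, List.map_cons]
    show (item, false) :: gwlmA_loop y ys = _
    refine congrArg₂ _ ?_ ?_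
    · simp; omega
    · rw [ih y (k+1)]
      refine congrArg₂ _ ?_ rfl
      funext p
      refine congrArg _ ?_
      simp only [List.length_cons]
      congr 1
      simp
      constructor <;> intro h <;> omega

-- ===== VERDICT (by name: the statement is the Claim_ definition above) =====
theorem generate_with_last_element_mark_spec : Claim_equal_generate_with_last_element_mark := by
  intro iterable _
  unfold Spec_generate_with_last_element_mark
  cases iterable with
  | nil => rfl
  | cons item rest =>
    show gwlmA_loop item rest = _
    rw [gwlmA_loop_enum rest item 0,
      show PySem.List.enumerate (item :: rest) 0 = PySem.List.enumerate (item :: rest) from rfl]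
    refine congrArg₂ _ ?_ rfl
    funext p
    refine congrArg _ ?_
    simp only [List.length_cons, decide_eq_decide]
    push_cast
    omega
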